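-- pv_equiv track=rewrite | github.com/Aashena/Frozen-Phrases | dsUTl.py | createNewQueryFromSeqLabel
-- ===== SOURCE A (Python) =====
-- def createNewQueryFromSeqLabel(splittedQ , seqLable): # should be refined! where?
--     # turn collect the terms form questionList and make a new query (terms that are labeled)
--     #input:
--         #splittedQ:    a list of question terms (question splitted by splitSpacy() )
--         #seqLable:     a label sequence that labels each terms in questionList whether they should or shouldn't come in the final query
--     #Return:
--         #newQuestion:  The new question generated
--     newQuestion = ''
--     beforeIsEmpty=False
--     for word, dict in zip(splittedQ , seqLable):
--         tag = dict[word]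
--         if tag!='O':
--             if beforeIsEmpty==True:
--                 newQuestion+='kkkkkkkkkkkkkkk '
--             beforeIsEmpty=False
--             newQuestion+= (word + ' ')
--         else:
--             beforeIsEmpty=True
--     return newQuestion
-- ===== SOURCE B (Python) =====
-- def createNewQueryFromSeqLabel(splittedQ, seqLable):
--     # Different decomposition: precompute the dropped-flags, shift them by one
--     # position to get "previous token was dropped", then build the parts list
--     # statelessly and join once (no running string, no mutable boolean state).
--     pairs = list(zip(splittedQ, seqLable))
--     dropped = [d[w] == 'O' for w, d in pairs]
--     prev = [False] + dropped[:-1]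
--     parts = []
--     for (w, _), o, p in zip(pairs, dropped, prev):
--         if not o:
--             if p:
--                 parts.append('kkkkkkkkkkkkkkk ')
--             parts.append(w + ' ')
--     return ''.join(parts)
-- ===== Notes on version B (the rewrite author's own statement) =====
-- stated objective: alternative
-- what changed: Replaces A's single stateful pass (running string + mutable beforeIsEmpty flag) by precomputing the dropped-flag list, zipping it with its one-position shift to get 'previous token dropped' per position, building a parts list statelessly and joining once.
import Mathlib
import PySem

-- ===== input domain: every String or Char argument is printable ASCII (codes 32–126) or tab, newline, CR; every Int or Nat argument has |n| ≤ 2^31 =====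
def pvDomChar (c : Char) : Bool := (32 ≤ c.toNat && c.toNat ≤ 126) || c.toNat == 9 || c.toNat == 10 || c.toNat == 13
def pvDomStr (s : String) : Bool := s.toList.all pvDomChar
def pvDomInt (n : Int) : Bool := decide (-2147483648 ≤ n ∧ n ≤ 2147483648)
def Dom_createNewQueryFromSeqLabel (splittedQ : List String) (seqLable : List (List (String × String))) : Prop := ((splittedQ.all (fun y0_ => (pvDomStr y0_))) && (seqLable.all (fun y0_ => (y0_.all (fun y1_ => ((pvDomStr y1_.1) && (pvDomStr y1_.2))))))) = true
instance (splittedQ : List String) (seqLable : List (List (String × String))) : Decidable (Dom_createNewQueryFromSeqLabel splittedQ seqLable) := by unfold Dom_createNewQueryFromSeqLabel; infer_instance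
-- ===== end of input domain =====

-- B replaces A's running string and mutable boolean with precomputed dropped-flags,
-- a shifted "previous dropped" list, a stateless parts pass and a single join
-- (objective: alternative decomposition, same cost).


-- ===== PORT A =====
-- loop body of A, over the state (newQuestion, beforeIsEmpty); a missing key is a
-- Python KeyError — excluded by Pre_ below (the state is returned unchanged there)
def pvAStep (st : String × Bool) (wd : String × List (String × String)) : String × Bool :=
  match List.lookup wd.1 wd.2 with
  | none => st
  | some tag =>
    if tag ≠ "O" then
      ((if st.2 then st.1 ++ "kkkkkkkkkkkkkkk " else st.1) ++ (wd.1 ++ " "), false)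
    else (st.1, true)

def createNewQueryFromSeqLabel (splittedQ : List String) (seqLable : List (List (String × String))) : String :=
  ((splittedQ.zip seqLable).foldl pvAStep ("", false)).1

-- ===== PORT B =====
-- loop body of B: t = ((word, dict), (dropped-here, dropped-just-before))
def pvBStep (acc : List String) (t : (String × List (String × String)) × (Bool × Bool)) : List String :=
  if t.2.1 then acc
  else acc ++ (if t.2.2 then ["kkkkkkkkkkkkkkk "] else []) ++ [t.1.1 ++ " "]

def createNewQueryFromSeqLabel_alt (splittedQ : List String) (seqLable : List (List (String × String))) : String :=
  let pairs := splittedQ.zip seqLable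
  let dropped : List Bool := pairs.map (fun p => List.lookup p.1 p.2 == some "O")
  let prev : List Bool := false :: dropped.dropLast
  String.join ((pairs.zip (dropped.zip prev)).foldl pvBStep [])

-- ===== PRECONDITION & SPEC =====
-- Pre_ excludes exactly the inputs where some zipped word is missing from its own dict: there A raises KeyError.
def Pre_createNewQueryFromSeqLabel (splittedQ : List String) (seqLable : List (List (String × String))) : Prop :=
  ∀ p ∈ splittedQ.zip seqLable, (List.lookup p.1 p.2).isSome

instance (splittedQ : List String) (seqLable : List (List (String × String))) : Decidable (Pre_createNewQueryFromSeqLabel splittedQ seqLable) := by unfold Pre_createNewQueryFromSeqLabel; infer_instance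

def pvWitness_createNewQueryFromSeqLabel : List String × (List (List (String × String))) :=
  (["red", "car", "fast"], [[("red", "X")], [("car", "O")], [("fast", "X")]])

def Spec_createNewQueryFromSeqLabel (splittedQ : List String) (seqLable : List (List (String × String))) (out : String) : Prop := out = createNewQueryFromSeqLabel_alt splittedQ seqLable
instance (splittedQ : List String) (seqLable : List (List (String × String))) (out : String) : Decidable (Spec_createNewQueryFromSeqLabel splittedQ seqLable out) := by unfold Spec_createNewQueryFromSeqLabel; infer_instance

-- ===== CLAIM (what is proved, stated in full; the proofs are below) =====
def Claim_equal_createNewQueryFromSeqLabel : Prop := ∀ (splittedQ : List String) (seqLable : List (List (String × String))), Dom_createNewQueryFromSeqLabel splittedQ seqLable → Pre_createNewQueryFromSeqLabel splittedQ seqLable → Spec_createNewQueryFromSeqLabel splittedQ seqLable (createNewQueryFromSeqLabel splittedQ seqLable)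

-- ===== LEMMAS AND PROOFS =====

-- the run decomposition both loops compute, used to relate them
def pvRuns : List (String × List (String × String)) → Bool → List String
  | [], _ => []
  | p :: t, b =>
    if List.lookup p.1 p.2 == some "O" then pvRuns t true
    else (if b then ["kkkkkkkkkkkkkkk "] else []) ++ [p.1 ++ " "] ++ pvRuns t false

lemma pv_foldl_shift (l : List String) :
    ∀ s₁ s₂ : String, l.foldl (fun r t => r ++ t) (s₁ ++ s₂) = s₁ ++ l.foldl (fun r t => r ++ t) s₂ := by
  induction l with
  | nil => intro s₁ s₂; rfl
  | cons x xs ih => intro s₁ s₂; simp only [List.foldl_cons, String.append_assoc, ih]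

lemma pv_join_cons (x : String) (l : List String) :
    String.join (x :: l) = x ++ String.join l := by
  show List.foldl (fun r s => r ++ s) ("" ++ x) l = x ++ String.join l
  rw [String.empty_append]
  have h := pv_foldl_shift l x ""
  rw [String.append_empty] at h
  exact h

-- A's fold equals (the join of) the run list, under key-presence
lemma pvA_eq_runs (pairs : List (String × List (String × String)))
    (h : ∀ p ∈ pairs, (List.lookup p.1 p.2).isSome) :
    ∀ acc b, (pairs.foldl pvAStep (acc, b)).1 = acc ++ String.join (pvRuns pairs b) := by
  induction pairs with
  | nil => intro acc b; simp [String.join, pvRuns]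
  | cons p t ih =>
    intro acc b
    obtain ⟨tag, htag⟩ := Option.isSome_iff_exists.mp (h p (by simp))
    have ht : ∀ q ∈ t, (List.lookup q.1 q.2).isSome := fun q hq => h q (by simp [hq])
    rw [List.foldl_cons]
    by_cases hO : tag = "O"
    · have hf : pvAStep (acc, b) p = (acc, true) := by
        subst hO; simp [pvAStep, htag]
      rw [hf, ih ht]
      have hfl : (List.lookup p.1 p.2 == some "O") = true := by simp [htag, hO]
      simp [pvRuns, hfl]
    · have hf : pvAStep (acc, b) p
          = ((if b then acc ++ "kkkkkkkkkkkkkkk " else acc) ++ (p.1 ++ " "), false) := by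
        simp [pvAStep, htag, hO]
      rw [hf, ih ht]
      have hfl : (List.lookup p.1 p.2 == some "O") = false := by simp [htag, hO]
      cases b
      · have hr : pvRuns (p :: t) false = (p.1 ++ " ") :: pvRuns t false := by
          simp [pvRuns, hfl]
        rw [hr, pv_join_cons, if_neg (by simp), String.append_assoc]
      · have hr : pvRuns (p :: t) true
            = "kkkkkkkkkkkkkkk " :: (p.1 ++ " ") :: pvRuns t false := by
          simp [pvRuns, hfl]
        rw [hr, pv_join_cons, pv_join_cons, if_pos rfl, String.append_assoc,
          String.append_assoc]

-- B's stateless zipped fold equals the run list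
lemma pvB_eq_runs (pairs : List (String × List (String × String))) :
    ∀ (b : Bool) (acc : List String),
    ((pairs.zip (((pairs.map (fun p => List.lookup p.1 p.2 == some "O")).zip
        (b :: (pairs.map (fun p => List.lookup p.1 p.2 == some "O")).dropLast)))).foldl
      pvBStep acc) = acc ++ pvRuns pairs b := by
  induction pairs with
  | nil => intro b acc; simp [pvRuns]
  | cons p t ih =>
    intro b acc
    cases t with
    | nil =>
      by_cases hp : (List.lookup p.1 p.2 == some "O") = true
      · simp [pvBStep, pvRuns, hp]
      · simp only [Bool.not_eq_true] at hp
        simp [pvBStep, pvRuns, hp]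
    | cons q u =>
      have hstep :
          ((p :: q :: u).zip (((p :: q :: u).map (fun p => List.lookup p.1 p.2 == some "O")).zip
              (b :: ((p :: q :: u).map (fun p => List.lookup p.1 p.2 == some "O")).dropLast)))
          = (p, ((List.lookup p.1 p.2 == some "O"), b)) ::
            ((q :: u).zip (((q :: u).map (fun p => List.lookup p.1 p.2 == some "O")).zip
              ((List.lookup p.1 p.2 == some "O") :: ((q :: u).map (fun p => List.lookup p.1 p.2 == some "O")).dropLast))) := rfl
      rw [hstep, List.foldl_cons, ih]
      by_cases hp : (List.lookup p.1 p.2 == some "O") = true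
      · simp [pvBStep, pvRuns, hp]
      · simp only [Bool.not_eq_true] at hp
        simp [pvBStep, pvRuns, hp, List.append_assoc]

-- ===== VERDICT (by name: the statement is the Claim_ definition above) =====
theorem createNewQueryFromSeqLabel_spec : Claim_equal_createNewQueryFromSeqLabel := by
  intro splittedQ seqLable _hDom hPre
  unfold Spec_createNewQueryFromSeqLabel
  have hA : createNewQueryFromSeqLabel splittedQ seqLable
      = "" ++ String.join (pvRuns (splittedQ.zip seqLable) false) :=
    pvA_eq_runs _ hPre "" false
  have hB : createNewQueryFromSeqLabel_alt splittedQ seqLable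
      = String.join ([] ++ pvRuns (splittedQ.zip seqLable) false) :=
    congrArg String.join (pvB_eq_runs (splittedQ.zip seqLable) false [])
  rw [hA, hB, String.empty_append, List.nil_append]
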